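-- pv_equiv track=rewrite | github.com/gridvisi/Python_workspace | 4 ddm_course/声明式编程/7 kyu Start with a Vowel.py | vowel_start
-- ===== SOURCE A (Python) =====
-- def vowel_start(s):
--     r = ''
--     for letter in s:
--         if letter in 'aeiouAEIOU':
--             r+=' '+letter.lower()
--         elif letter.isalnum():
--             r+=letter.lower()
--     return r.lstrip(' ')
-- ===== SOURCE B (Python) =====
-- def vowel_start(s):
--     cleaned = ''.join(c.lower() for c in s if c.isalnum())
--     segs, cur = [], ''
--     for c in cleaned:
--         if c in 'aeiou':
--             segs.append(cur)
--             cur = c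
--         else:
--             cur += c
--     segs.append(cur)
--     if segs[0] == '':
--         segs.pop(0)
--     return ' '.join(segs)
-- ===== Notes on version B (the rewrite author's own statement) =====
-- stated objective: alternative
-- what changed: B first builds the cleaned lowercase-alnum string, then groups it into segments cut before each vowel and joins them with single spaces (dropping a leading empty segment), instead of A's fused per-character loop that prepends a space to every vowel and lstrip's the result.
import Mathlib
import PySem

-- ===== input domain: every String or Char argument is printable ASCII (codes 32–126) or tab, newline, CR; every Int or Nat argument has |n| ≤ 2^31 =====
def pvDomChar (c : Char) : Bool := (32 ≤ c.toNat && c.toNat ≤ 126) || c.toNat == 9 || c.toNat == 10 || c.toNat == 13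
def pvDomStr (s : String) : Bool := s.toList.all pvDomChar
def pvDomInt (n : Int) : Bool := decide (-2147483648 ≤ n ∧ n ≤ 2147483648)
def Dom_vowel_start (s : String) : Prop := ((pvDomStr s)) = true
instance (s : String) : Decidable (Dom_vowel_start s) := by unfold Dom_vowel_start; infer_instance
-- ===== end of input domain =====

-- B rebuilds the answer as cleaned segments cut at each vowel and joined with ' '
-- (no per-character space prepending and no final lstrip); objective: alternative decomposition.

-- ===== PORT A =====
-- A: one fused loop over s appending ' '+vowel / alnum char to a string, then r.lstrip(' ').
-- 'letter in "aeiouAEIOU"' on a single char is char membership, ported as list membership;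
-- r.lstrip(' ') is ported by hand as dropWhile (· == ' ') — exact: lstrip(' ') removes exactly
-- the leading run of ' ' characters.
def vowel_start (s : String) : String :=
  let r := s.toList.foldl (fun (r : List Char) (letter : Char) =>
      if letter ∈ ['a', 'e', 'i', 'o', 'u', 'A', 'E', 'I', 'O', 'U'] then
        r ++ [' ', PySem.Chars.lowerChar letter]
      else if PySem.Chars.isalnum letter then r ++ [PySem.Chars.lowerChar letter]
      else r) []
  String.ofList (r.dropWhile (· == ' '))

-- ===== PORT B =====
-- B (Source B): build the cleaned lowercase-alnum list, accumulate (segs, cur) cutting before each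
-- vowel, append the final segment, pop a leading empty segment, and ' '.join the segments.
def vowel_start_alt (s : String) : String :=
  let cleaned := (s.toList.filter PySem.Chars.isalnum).map PySem.Chars.lowerChar
  let st := cleaned.foldl (fun (st : List (List Char) × List Char) c =>
      if c ∈ ['a', 'e', 'i', 'o', 'u'] then (st.1 ++ [st.2], [c]) else (st.1, st.2 ++ [c])) ([], [])
  let segs := st.1 ++ [st.2]
  -- 'if segs[0] == "": segs.pop(0)' — segs is never empty; pop(0) discards the head
  let segs := if segs.head? = some [] then segs.tail else segs
  String.ofList (PySem.Chars.join [' '] segs)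

-- ===== PRECONDITION & SPEC =====
def Spec_vowel_start (s : String) (out : String) : Prop := out = vowel_start_alt s
instance (s : String) (out : String) : Decidable (Spec_vowel_start s out) := by unfold Spec_vowel_start; infer_instance

-- ===== CLAIM (what is proved, stated in full; the proofs are below) =====
def Claim_equal_vowel_start : Prop := ∀ (s : String), Dom_vowel_start s → Spec_vowel_start s (vowel_start s)

-- ===== LEMMAS AND PROOFS =====

-- canonical form of A's loop body: space-before-vowel insertion over the cleaned list
def pvIns : List Char → List Char
  | [] => []
  | c :: t => if c ∈ ['a', 'e', 'i', 'o', 'u'] then ' ' :: c :: pvIns t else c :: pvIns t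

-- canonical form of B's loop: segments cut before each vowel, plus the open segment
def pvSeg (cur : List Char) : List Char → List (List Char) × List Char
  | [] => ([], cur)
  | c :: t =>
      if c ∈ ['a', 'e', 'i', 'o', 'u'] then
        let p := pvSeg [c] t; (cur :: p.1, p.2)
      else pvSeg (cur ++ [c]) t

def pvF (c : Char) : List Char :=
  if c ∈ ['a', 'e', 'i', 'o', 'u', 'A', 'E', 'I', 'O', 'U'] then [' ', PySem.Chars.lowerChar c]
  else if PySem.Chars.isalnum c then [PySem.Chars.lowerChar c] else []

lemma pv_upper_mem (c : Char) (h : PySem.Chars.isupper c = true) :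
    c ∈ ['A','B','C','D','E','F','G','H','I','J','K','L','M','N','O','P','Q','R','S','T','U','V','W','X','Y','Z'] := by
  simp [PySem.Chars.isupper] at h
  obtain ⟨h1, h2⟩ := h
  have hb1 : 65 ≤ c.toNat := h1
  have hb2 : c.toNat ≤ 90 := h2
  have hc : Char.ofNat c.toNat = c := Char.ofNat_toNat c
  set n := c.toNat with hn
  rw [← hc]
  interval_cases n <;> decide

-- per-character facts linking A's test on the raw character to B's test on the cleaned one
lemma pv_vowel_char (c : Char) (h : c ∈ ['a', 'e', 'i', 'o', 'u', 'A', 'E', 'I', 'O', 'U']) :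
    PySem.Chars.isalnum c = true ∧ PySem.Chars.lowerChar c ∈ ['a', 'e', 'i', 'o', 'u'] := by
  have hm := h
  simp only [List.mem_cons, List.not_mem_nil, or_false] at hm
  rcases hm with rfl | rfl | rfl | rfl | rfl | rfl | rfl | rfl | rfl | rfl <;>
    exact ⟨by decide, by decide⟩

lemma pv_lower_eq_self (c : Char) (h : PySem.Chars.isupper c = false) :
    PySem.Chars.lowerChar c = c := by
  simp [PySem.Chars.lowerChar, h]

lemma pv_nonvowel_char (c : Char) (hv : c ∉ ['a', 'e', 'i', 'o', 'u', 'A', 'E', 'I', 'O', 'U'])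
    (ha : PySem.Chars.isalnum c = true) :
    PySem.Chars.lowerChar c ∉ ['a', 'e', 'i', 'o', 'u'] := by
  cases hu : PySem.Chars.isupper c with
  | false =>
      rw [pv_lower_eq_self c hu]
      intro hm
      refine hv ?_
      simp only [List.mem_cons, List.not_mem_nil, or_false] at hm ⊢
      tauto
  | true =>
      have hmem := pv_upper_mem c hu
      simp only [List.mem_cons, List.not_mem_nil, or_false] at hmem
      rcases hmem with rfl | rfl | rfl | rfl | rfl | rfl | rfl | rfl | rfl | rfl | rfl | rfl | rfl |
        rfl | rfl | rfl | rfl | rfl | rfl | rfl | rfl | rfl | rfl | rfl | rfl | rfl <;>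
        first
          | decide
          | exact (hv (by decide)).elim

lemma pv_alnum_lower_ne_space (c : Char) (ha : PySem.Chars.isalnum c = true) :
    PySem.Chars.lowerChar c ≠ ' ' := by
  cases hu : PySem.Chars.isupper c with
  | false =>
      rw [pv_lower_eq_self c hu]
      intro hc
      subst hc
      exact absurd ha (by decide)
  | true =>
      have hmem := pv_upper_mem c hu
      simp only [List.mem_cons, List.not_mem_nil, or_false] at hmem
      rcases hmem with rfl | rfl | rfl | rfl | rfl | rfl | rfl | rfl | rfl | rfl | rfl | rfl | rfl |
        rfl | rfl | rfl | rfl | rfl | rfl | rfl | rfl | rfl | rfl | rfl | rfl | rfl <;> decide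

-- A's accumulating loop is acc ++ flatMap pvF
lemma pv_foldA (l : List Char) (acc : List Char) :
    l.foldl (fun (r : List Char) (letter : Char) =>
      if letter ∈ ['a', 'e', 'i', 'o', 'u', 'A', 'E', 'I', 'O', 'U'] then
        r ++ [' ', PySem.Chars.lowerChar letter]
      else if PySem.Chars.isalnum letter then r ++ [PySem.Chars.lowerChar letter]
      else r) acc = acc ++ l.flatMap pvF := by
  induction l generalizing acc with
  | nil => simp
  | cons c t ih =>
      simp only [List.foldl_cons, List.flatMap_cons, pvF]
      split_ifs with h1 h2 <;> rw [ih] <;> simp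

-- A's emitted characters are exactly pvIns of B's cleaned list
lemma pv_flatMap_eq_pvIns (l : List Char) :
    l.flatMap pvF = pvIns ((l.filter PySem.Chars.isalnum).map PySem.Chars.lowerChar) := by
  induction l with
  | nil => rfl
  | cons c t ih =>
      by_cases h1 : c ∈ ['a', 'e', 'i', 'o', 'u', 'A', 'E', 'I', 'O', 'U']
      · obtain ⟨ha, hv⟩ := pv_vowel_char c h1
        simp [pvF, h1, ha, pvIns, hv, ih]
      · by_cases h2 : PySem.Chars.isalnum c = true
        · have hnv := pv_nonvowel_char c h1 h2
          simp [pvF, h1, h2, pvIns, hnv, ih]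
        · simp [pvF, h1, h2, ih]

-- B's pair-state loop is pvSeg with the done-segments accumulator factored out
lemma pv_foldB (cl : List Char) (d : List (List Char)) (cur : List Char) :
    cl.foldl (fun (st : List (List Char) × List Char) c =>
        if c ∈ ['a', 'e', 'i', 'o', 'u'] then (st.1 ++ [st.2], [c]) else (st.1, st.2 ++ [c]))
      (d, cur) = (d ++ (pvSeg cur cl).1, (pvSeg cur cl).2) := by
  induction cl generalizing d cur with
  | nil => simp [pvSeg]
  | cons c t ih =>
      simp only [List.foldl_cons]
      split_ifs with h
      · rw [ih, show pvSeg cur (c :: t) = (cur :: (pvSeg [c] t).1, (pvSeg [c] t).2) from by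
          simp [pvSeg, h]]
        simp
      · rw [ih, show pvSeg cur (c :: t) = pvSeg (cur ++ [c]) t from by simp [pvSeg, h]]

-- joining pvSeg's segments with ' ' re-creates cur ++ pvIns
lemma pv_join_seg (cl : List Char) (cur : List Char) :
    PySem.Chars.join [' '] ((pvSeg cur cl).1 ++ [(pvSeg cur cl).2]) = cur ++ pvIns cl := by
  induction cl generalizing cur with
  | nil => simp [pvSeg, pvIns, PySem.Chars.join_singleton]
  | cons c t ih =>
      by_cases h : c ∈ ['a', 'e', 'i', 'o', 'u']
      · have h2 : pvSeg cur (c :: t) = (cur :: (pvSeg [c] t).1, (pvSeg [c] t).2) := by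
          simp [pvSeg, h]
        rw [h2]
        simp only [List.cons_append]
        rcases he : (pvSeg [c] t).1 ++ [(pvSeg [c] t).2] with _ | ⟨q, rest⟩
        · simp at he
        · rw [PySem.Chars.join_cons_cons, ← he, ih [c]]
          simp [pvIns, h]
      · have h2 : pvSeg cur (c :: t) = pvSeg (cur ++ [c]) t := by
          simp [pvSeg, h]
        rw [h2, ih (cur ++ [c])]
        simp [pvIns, h]

-- the first segment of pvSeg cur cl extends cur
lemma pv_seg_head (cl : List Char) (cur : List Char) :
    ∃ p, ((pvSeg cur cl).1 ++ [(pvSeg cur cl).2]).head? = some (cur ++ p) := by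
  induction cl generalizing cur with
  | nil => exact ⟨[], by simp [pvSeg]⟩
  | cons c t ih =>
      by_cases h : c ∈ ['a', 'e', 'i', 'o', 'u']
      · exact ⟨[], by simp [pvSeg, h]⟩
      · obtain ⟨p, hp⟩ := ih (cur ++ [c])
        refine ⟨c :: p, ?_⟩
        have h2 : pvSeg cur (c :: t) = pvSeg (cur ++ [c]) t := by simp [pvSeg, h]
        rw [h2, hp]
        simp

lemma pv_cleaned_ne_space (s : String) (c : Char)
    (h : c ∈ (s.toList.filter PySem.Chars.isalnum).map PySem.Chars.lowerChar) : c ≠ ' ' := by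
  simp only [List.mem_map, List.mem_filter] at h
  obtain ⟨a, ⟨_, ha⟩, rfl⟩ := h
  exact pv_alnum_lower_ne_space a ha

-- list-level heart of the equivalence: A's strip-after-insert equals B's join-of-segments
lemma pv_main (cl : List Char) (hns : ∀ c ∈ cl, c ≠ ' ') :
    (pvIns cl).dropWhile (· == ' ') =
      PySem.Chars.join [' ']
        (if ((pvSeg [] cl).1 ++ [(pvSeg [] cl).2]).head? = some [] then
          ((pvSeg [] cl).1 ++ [(pvSeg [] cl).2]).tail
        else (pvSeg [] cl).1 ++ [(pvSeg [] cl).2]) := by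
  rcases cl with _ | ⟨c, t⟩
  · simp [pvSeg, pvIns, PySem.Chars.join_nil]
  · have hcs : c ≠ ' ' := hns c (by simp)
    by_cases hv : c ∈ ['a', 'e', 'i', 'o', 'u']
    · -- leading vowel: A strips the single leading space, B pops the empty first segment
      have h1 : pvIns (c :: t) = ' ' :: c :: pvIns t := by simp [pvIns, hv]
      have h2 : pvSeg ([] : List Char) (c :: t) = ([] :: (pvSeg [c] t).1, (pvSeg [c] t).2) := by
        simp [pvSeg, hv]
      rw [h1, h2]
      simp only [List.cons_append, List.head?_cons, List.tail_cons]
      simp only [ite_true]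
      rw [pv_join_seg t [c]]
      simp [hcs]
    · -- leading non-vowel: no leading space on A's side, non-empty first segment on B's side
      have h1 : pvIns (c :: t) = c :: pvIns t := by simp [pvIns, hv]
      have h2 : pvSeg ([] : List Char) (c :: t) = pvSeg [c] t := by simp [pvSeg, hv]
      rw [h1, h2]
      obtain ⟨p, hp⟩ := pv_seg_head t [c]
      rw [hp, if_neg (by simp), pv_join_seg t [c]]
      simp [hcs]

-- ===== VERDICT (by name: the statement is the Claim_ definition above) =====
theorem vowel_start_spec : Claim_equal_vowel_start := by
  intro s _
  unfold Spec_vowel_start vowel_start vowel_start_alt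
  simp only [pv_foldA, pv_flatMap_eq_pvIns, List.nil_append, pv_foldB]
  exact congrArg String.ofList
    (pv_main ((s.toList.filter PySem.Chars.isalnum).map PySem.Chars.lowerChar)
      (fun c hc => pv_cleaned_ne_space s c hc))
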